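-- pv_equiv track=rewrite | github.com/Aleffelisberto/python | boardNumbers.py | verifyMove
-- ===== SOURCE A (Python) =====
-- def verifyMove(gameBoard, move, position):
--     if move[1] not in ['l','r','u','d'] or int(move[0]) not in range(16):
--         return False
--
--     number = move[0]
--     direction = move[1]
--     index = [-1, -1]
--     for i in range(4):
--         if number in gameBoard[i]:
--             idx = gameBoard[i].index(number)
--             index[0] = i
--             index[1] = idx
--             break
--         else:
--             continue
--     position.append(index[0])
--     position.append(index[1])
--     if direction == 'l':
--         if (index[1] - 1) >= 0:
--             if gameBoard[index[0]][index[1] - 1] == ' ':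
--                 return True
--             else: return False
--     elif direction == 'r':
--         if index[1] + 1 < 4:
--             if gameBoard[index[0]][index[1] + 1] == ' ':
--                 return True
--             else:
--                 return False
--     elif direction == 'u':
--         if index[0] - 1 >= 0:
--             if gameBoard[index[0] - 1][index[1]] == ' ':
--                 return True
--             else:
--                 return False
--     else:
--         if index[0] + 1 < 4:
--             if gameBoard[index[0] + 1][index[1]] == ' ':
--                 return True
--             else:
--                 return False
-- ===== SOURCE B (Python) =====
-- # Flatten the board into a labelled cell list once; find the tile there and answer by
-- # membership in the blank-cell set — no per-direction branches, no board indexing.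
-- # Like the original, appends the located coordinates to `position` (return-value
-- # equivalence; the mutation is identical).
-- def verifyMove(gameBoard, move, position):
--     moves = {'l': (0, -1), 'r': (0, 1), 'u': (-1, 0), 'd': (1, 0)}
--     if move[1] not in moves or int(move[0]) not in range(16):
--         return False
--     cells = [(tile, (i, j))
--              for i, row in enumerate(gameBoard)
--              for j, tile in enumerate(row)]
--     r, c = next((p for t, p in cells if t == move[0]), (-1, -1))
--     position += (r, c)
--     dr, dc = moves[move[1]]
--     ni, nj = r + dr, c + dc
--     if 0 <= ni < 4 and 0 <= nj < 4:
--         return (ni, nj) in [p for t, p in cells if t == ' ']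
-- ===== Notes on version B (the rewrite author's own statement) =====
-- stated objective: alternative
-- what changed: B flattens the board once into a labelled cell list, locates the tile by a single search over it and answers by membership of the target coordinate in the blank-cell list behind a direction->delta table and one full bounds test, replacing A's per-row scan with list.index and four copy-pasted direction branches; Pre_ keeps all invalid-direction inputs (A returns False untouched) and otherwise restricts to the natural 4x4-board domain, excluding the inputs where A raises and the ragged boards whose one-axis bounds behaviour is accidental.
-- intended difference: On a move 'r' or 'd' whose digit tile is absent from the board, A's sentinel index [-1,-1] makes it read an unrelated cell via negative-index wraparound (gameBoard[-1][0] resp. gameBoard[0][-1]) and return that cell's blank test, while B returns None, the intended fall-through when no movable tile was located. — e.g. on verifyMove([["1", "2", "3", "4"], ["5", "6", "7", "8"], ["9", "a", "b", "c"], [" ", "d", "e", "f"]], "0r", []): A returns some true, B returns none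
-- outside the precondition, e.g. on verifyMove([['a', 'b', 'c', 'd', 'e', '5']], '5l', []): A returns False, B returns None
import Mathlib
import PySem

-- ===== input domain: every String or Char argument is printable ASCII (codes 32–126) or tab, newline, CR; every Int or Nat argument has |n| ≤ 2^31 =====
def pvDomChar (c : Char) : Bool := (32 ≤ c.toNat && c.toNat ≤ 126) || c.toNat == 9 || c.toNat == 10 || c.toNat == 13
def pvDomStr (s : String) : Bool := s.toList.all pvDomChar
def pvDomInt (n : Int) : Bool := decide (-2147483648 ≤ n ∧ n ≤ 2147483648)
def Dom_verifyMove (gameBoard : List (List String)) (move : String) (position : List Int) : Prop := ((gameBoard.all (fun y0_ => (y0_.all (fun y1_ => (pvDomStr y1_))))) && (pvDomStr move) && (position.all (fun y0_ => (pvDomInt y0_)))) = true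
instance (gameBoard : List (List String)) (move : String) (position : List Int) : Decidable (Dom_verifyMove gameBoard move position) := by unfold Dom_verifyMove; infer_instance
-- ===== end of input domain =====

-- B flattens the board once into a labelled cell list, locates the tile with a single
-- find over it and answers by membership in the blank-cell list (delta table, one full
-- bounds test) instead of A's row scan plus four per-direction branches; both mutate
-- `position` identically, the equivalence proved is about the return value.


-- ===== PORT A =====
-- gameBoard[i][j] with Python index semantics (negative wraps, out of range = IndexError = none)
def vmCell (gameBoard : List (List String)) (i j : Int) : Option String :=
  (PySem.List.pyGet? gameBoard i).bind (fun row => PySem.List.pyGet? row j)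

-- A's "for i in range(4): if number in gameBoard[i]: idx = ...; index[0] = i; index[1] = idx; break"
def vmScanA (gameBoard : List (List String)) (number : String) : List Int → Option (Int × Int)
  | [] => some (-1, -1)
  | i :: rest =>
    match PySem.List.pyGet? gameBoard i with
    | none => none   -- IndexError, excluded by Pre_
    | some row =>
      if number ∈ row then
        match PySem.List.index? row number with
        | some idx => some (i, (idx : Int))
        | none => none   -- unreachable: number ∈ row
      else vmScanA gameBoard number rest

def verifyMove (gameBoard : List (List String)) (move : String) (position : List Int) : Option Bool :=
  match PySem.Str.pyGet? move 1 with
  | none => none   -- IndexError, excluded by Pre_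
  | some c1 =>
    if c1 ∉ ['l', 'r', 'u', 'd'] then some false
    else match PySem.Str.pyGet? move 0 with
      | none => none
      | some c0 =>
        match PySem.Int.ofChars? [c0] with
        | none => none   -- ValueError, excluded by Pre_
        | some v =>
          if v ∉ PySem.List.pyRange 0 16 1 then some false
          else
            match vmScanA gameBoard (String.ofList [c0]) (PySem.List.pyRange 0 4 1) with
            | none => none
            | some (r, c) =>   -- index = [r, c]; position.append(r); position.append(c)
              if c1 = 'l' then
                if c - 1 ≥ 0 then
                  match vmCell gameBoard r (c - 1) with
                  | none => none
                  | some s => if s = " " then some true else some false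
                else none
              else if c1 = 'r' then
                if c + 1 < 4 then
                  match vmCell gameBoard r (c + 1) with
                  | none => none
                  | some s => if s = " " then some true else some false
                else none
              else if c1 = 'u' then
                if r - 1 ≥ 0 then
                  match vmCell gameBoard (r - 1) c with
                  | none => none
                  | some s => if s = " " then some true else some false
                else none
              else
                if r + 1 < 4 then
                  match vmCell gameBoard (r + 1) c with
                  | none => none
                  | some s => if s = " " then some true else some false
                else none

-- ===== PORT B =====
def vmMoves : PySem.Dict Char (Int × Int) :=
  ((((PySem.Dict.empty).insert 'l' ((0 : Int), (-1 : Int))).insert 'r' (0, 1)).insert 'u' (-1, 0)).insert 'd' (1, 0)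

-- B's "cells = [(tile, (i, j)) for i, row in enumerate(gameBoard) for j, tile in enumerate(row)]"
def vmCells (gameBoard : List (List String)) : List (String × (Int × Int)) :=
  (PySem.List.enumerate gameBoard).flatMap (fun ir =>
    (PySem.List.enumerate ir.2).map (fun jt => (jt.2, (ir.1, jt.1))))

def verifyMove_alt (gameBoard : List (List String)) (move : String) (position : List Int) : Option Bool :=
  match PySem.Str.pyGet? move 1 with
  | none => none
  | some c1 =>
    if (PySem.Dict.contains vmMoves c1) = false then some false
    else match PySem.Str.pyGet? move 0 with
      | none => none
      | some c0 =>
        match PySem.Int.ofChars? [c0] with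
        | none => none
        | some v =>
          if v ∉ PySem.List.pyRange 0 16 1 then some false
          else
            let cells := vmCells gameBoard
            -- next((p for t, p in cells if t == move[0]), (-1, -1)); position += (r, c)
            let rc := ((cells.find? (fun p => p.1 == String.ofList [c0])).map Prod.snd).getD (-1, -1)
            match PySem.Dict.get? vmMoves c1 with
            | none => none   -- unreachable: c1 is a key of vmMoves here
            | some dd =>
              let ni := rc.1 + dd.1
              let nj := rc.2 + dd.2
              if 0 ≤ ni ∧ ni < 4 ∧ 0 ≤ nj ∧ nj < 4 then
                some (decide ((ni, nj) ∈ (cells.filter (fun p => p.1 == " ")).map Prod.snd))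
              else none

-- ===== PRECONDITION & SPEC =====
-- Pre_ keeps every input whose direction character is invalid (A returns False with no
-- board access) and otherwise restricts to the function's natural domain — a 4×4 board,
-- a move of at least two characters whose first character is a digit: this excludes the
-- inputs where A raises (short moves → IndexError, non-digit tile with a valid direction
-- → ValueError, short boards → IndexError) and the ragged non-4×4 boards A happens to
-- return on, whose one-axis bounds test is accidental.
def Pre_verifyMove (gameBoard : List (List String)) (move : String) (position : List Int) : Prop :=
  2 ≤ move.toList.length ∧
  (move.toList.getD 1 ' ' ∈ ['l', 'r', 'u', 'd'] →
    (move.toList.getD 0 ' ').isDigit = true ∧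
    gameBoard.length = 4 ∧ ∀ row ∈ gameBoard, row.length = 4)
instance (gameBoard : List (List String)) (move : String) (position : List Int) : Decidable (Pre_verifyMove gameBoard move position) := by unfold Pre_verifyMove; infer_instance

def pvWitness_verifyMove : List (List String) × String × List Int :=
  ([[" ", "1", "2", "3"], ["4", "5", "6", "7"], ["8", "9", "10", "11"], ["12", "13", "14", "15"]], "1l", [])

-- On a move 'r' or 'd' whose digit tile is absent from the board, A's sentinel index
-- [-1,-1] makes it read an unrelated cell through negative-index wraparound
-- (gameBoard[-1][0] resp. gameBoard[0][-1]) and return that cell's blank test, while B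
-- returns None — the intended fall-through when no movable tile was located.
def D_verifyMove (gameBoard : List (List String)) (move : String) (position : List Int) : Prop :=
  2 ≤ move.toList.length ∧
  move.toList.getD 1 ' ' ∈ ['r', 'd'] ∧
  (move.toList.getD 0 ' ').isDigit = true ∧
  ∀ row ∈ gameBoard, String.ofList [move.toList.getD 0 ' '] ∉ row
instance (gameBoard : List (List String)) (move : String) (position : List Int) : Decidable (D_verifyMove gameBoard move position) := by unfold D_verifyMove; infer_instance

def Spec_verifyMove (gameBoard : List (List String)) (move : String) (position : List Int) (out : Option Bool) : Prop := ¬ D_verifyMove gameBoard move position → out = verifyMove_alt gameBoard move position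
instance (gameBoard : List (List String)) (move : String) (position : List Int) (out : Option Bool) : Decidable (Spec_verifyMove gameBoard move position out) := by unfold Spec_verifyMove; infer_instance

def pvDiffWitness_verifyMove : List (List String) × String × List Int :=
  ([["1", "2", "3", "4"], ["5", "6", "7", "8"], ["9", "a", "b", "c"], [" ", "d", "e", "f"]], "0r", [])

def pvDiffWitnessOut_verifyMove : (Option Bool) × (Option Bool) := (some true, none)

-- ===== CLAIM (what is proved, stated in full; the proofs are below) =====
def Claim_unchanged_verifyMove : Prop := ∀ (gameBoard : List (List String)) (move : String) (position : List Int), Dom_verifyMove gameBoard move position → Pre_verifyMove gameBoard move position → Spec_verifyMove gameBoard move position (verifyMove gameBoard move position)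
def Claim_changed_verifyMove : Prop := Dom_verifyMove (pvDiffWitness_verifyMove.1) (pvDiffWitness_verifyMove.2.1) (pvDiffWitness_verifyMove.2.2) ∧ Pre_verifyMove (pvDiffWitness_verifyMove.1) (pvDiffWitness_verifyMove.2.1) (pvDiffWitness_verifyMove.2.2) ∧ D_verifyMove (pvDiffWitness_verifyMove.1) (pvDiffWitness_verifyMove.2.1) (pvDiffWitness_verifyMove.2.2) ∧ verifyMove (pvDiffWitness_verifyMove.1) (pvDiffWitness_verifyMove.2.1) (pvDiffWitness_verifyMove.2.2) = pvDiffWitnessOut_verifyMove.1 ∧ verifyMove_alt (pvDiffWitness_verifyMove.1) (pvDiffWitness_verifyMove.2.1) (pvDiffWitness_verifyMove.2.2) = pvDiffWitnessOut_verifyMove.2 ∧ pvDiffWitnessOut_verifyMove.1 ≠ pvDiffWitnessOut_verifyMove.2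
def Claim_exact_verifyMove : Prop := ∀ (gameBoard : List (List String)) (move : String) (position : List Int), Dom_verifyMove gameBoard move position → Pre_verifyMove gameBoard move position → D_verifyMove gameBoard move position → verifyMove gameBoard move position ≠ verifyMove_alt gameBoard move position

-- ===== LEMMAS AND PROOFS =====

theorem vm_digit_cases (c : Char) (h : c.isDigit = true) :
    c = '0' ∨ c = '1' ∨ c = '2' ∨ c = '3' ∨ c = '4' ∨ c = '5' ∨ c = '6' ∨ c = '7' ∨ c = '8' ∨ c = '9' := by
  have h1 : 48 ≤ c.toNat ∧ c.toNat ≤ 57 := by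
    simp [Char.isDigit] at h
    exact ⟨h.1, h.2⟩
  have hc : c = Char.ofNat c.toNat := (Char.ofNat_toNat c).symm
  obtain ⟨hl, hr⟩ := h1
  interval_cases h2 : c.toNat <;> rw [hc] <;> decide

theorem mem_vmCells_iff (gb : List (List String)) (t : String) (x y : Int) :
    ((t, (x, y)) ∈ vmCells gb ↔ ∃ (i j : Nat) (row : List String),
      gb[i]? = some row ∧ row[j]? = some t ∧ x = i ∧ y = j) := by
  simp [vmCells, List.mem_flatMap, List.mem_map, PySem.List.mem_enumerate_iff]
  constructor
  · rintro ⟨k, hk, m, ⟨hm, ht⟩, hx, hy⟩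
    exact ⟨k, m, gb[k], by simp [hk], by simp [hm, ht], hx.symm, hy.symm⟩
  · rintro ⟨i, j, row, hrow, ht, hx, hy⟩
    obtain ⟨hi', hrw⟩ := List.getElem?_eq_some_iff.mp hrow
    obtain ⟨hj, htj⟩ := List.getElem?_eq_some_iff.mp ht
    exact ⟨i, hi', j, ⟨by simp [hrw]; omega, by simp [hrw, htj]⟩, hx.symm, hy.symm⟩

theorem vm_find_row (row : List String) (n : String) (i : Int) (s : Int) :
    ((PySem.List.enumerate row s).map (fun jt => (jt.2, (i, jt.1)))).find? (fun p => p.1 == n)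
      = (PySem.List.index? row n).map (fun j => (n, (i, s + (j : Int)))) := by
  induction row generalizing s with
  | nil => simp [PySem.List.enumerate_nil]
  | cons x xs ih =>
    rw [PySem.List.enumerate_cons]
    by_cases hx : x = n
    · subst hx
      rw [PySem.List.index?_cons_self]
      simp
    · rw [PySem.List.index?_cons_of_ne xs hx]
      simp only [List.map_cons, List.find?]
      rw [show (x == n) = false by simp [hx]]
      simp only [ih (s + 1)]
      cases PySem.List.index? xs n with
      | none => simp
      | some j => simp; ring

-- blank-cell membership reads back exactly one board cell
theorem vm_mem_blanks_iff (gb : List (List String)) (i j : Nat) (row : List String)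
    (hrow : gb[i]? = some row) (hj : j < row.length) :
    (((i : Int), (j : Int)) ∈ ((vmCells gb).filter (fun p => p.1 == " ")).map Prod.snd) ↔ row[j] = " " := by
  constructor
  · rintro h
    rcases List.mem_map.mp h with ⟨⟨t, xy⟩, hmem, hsnd⟩
    rcases List.mem_filter.mp hmem with ⟨hc, hblank⟩
    have ht : t = " " := by simpa using hblank
    subst ht
    simp only at hsnd
    subst hsnd
    rcases (mem_vmCells_iff gb " " i j).mp hc with ⟨i', j', row', hrow', ht', hx, hy⟩
    have hi : i = i' := by exact_mod_cast hx
    have hjj : j = j' := by exact_mod_cast hy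
    subst hi; subst hjj
    rw [hrow'] at hrow
    cases hrow
    have := List.getElem?_eq_some_iff.mp ht'
    rcases this with ⟨_, h⟩
    exact h
  · intro h
    apply List.mem_map.mpr
    refine ⟨(" ", ((i : Int), (j : Int))), List.mem_filter.mpr ⟨?_, by simp⟩, rfl⟩
    exact (mem_vmCells_iff gb " " i j).mpr ⟨i, j, row, hrow, by simp [hj, h], rfl, rfl⟩

-- membership from index? results
theorem vm_mem_of_index?_some (r : List String) (n : String) (j : Nat)
    (h : PySem.List.index? r n = some j) : n ∈ r := by
  rw [PySem.List.index?_eq_idxOf?] at h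
  by_contra hn
  rw [List.idxOf?_eq_none_iff.mpr hn] at h
  cases h

theorem vm_not_mem_of_index?_none (r : List String) (n : String)
    (h : PySem.List.index? r n = none) : n ∉ r := by
  rw [PySem.List.index?_eq_idxOf?] at h
  exact List.idxOf?_eq_none_iff.mp h

-- A's row scan computes exactly B's flattened first match
theorem vm_scan_find (r0 r1 r2 r3 : List String) (n : String) :
    vmScanA [r0, r1, r2, r3] n (PySem.List.pyRange 0 4 1) =
      some ((((vmCells [r0, r1, r2, r3]).find? (fun p => p.1 == n)).map Prod.snd).getD (-1, -1)) := by
  have hrange : PySem.List.pyRange 0 4 1 = [0, 1, 2, 3] := by decide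
  have hcells : vmCells [r0, r1, r2, r3] =
      ((PySem.List.enumerate r0 0).map (fun jt => (jt.2, ((0 : Int), jt.1)))) ++
      (((PySem.List.enumerate r1 0).map (fun jt => (jt.2, ((1 : Int), jt.1)))) ++
      (((PySem.List.enumerate r2 0).map (fun jt => (jt.2, ((2 : Int), jt.1)))) ++
      (((PySem.List.enumerate r3 0).map (fun jt => (jt.2, ((3 : Int), jt.1)))) ++ []))) := by
    simp [vmCells, PySem.List.enumerate_cons, PySem.List.enumerate_nil]
  rw [hrange, hcells]
  simp only [List.find?_append, vm_find_row]
  have h0get : PySem.List.pyGet? [r0, r1, r2, r3] (0 : Int) = some r0 := rfl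
  have h1get : PySem.List.pyGet? [r0, r1, r2, r3] (1 : Int) = some r1 := rfl
  have h2get : PySem.List.pyGet? [r0, r1, r2, r3] (2 : Int) = some r2 := rfl
  have h3get : PySem.List.pyGet? [r0, r1, r2, r3] (3 : Int) = some r3 := rfl
  cases hidx0 : PySem.List.index? r0 n with
  | some j =>
    have h0 : n ∈ r0 := vm_mem_of_index?_some r0 n j hidx0
    rw [PySem.List.index?_eq_idxOf?] at hidx0
    simp [vmScanA, h0, hidx0]
  | none =>
    have h0 : n ∉ r0 := vm_not_mem_of_index?_none r0 n hidx0
    cases hidx1 : PySem.List.index? r1 n with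
    | some j =>
      have h1 : n ∈ r1 := vm_mem_of_index?_some r1 n j hidx1
      rw [PySem.List.index?_eq_idxOf?] at hidx1
      simp [vmScanA, h0, h1, hidx1]
    | none =>
      have h1 : n ∉ r1 := vm_not_mem_of_index?_none r1 n hidx1
      cases hidx2 : PySem.List.index? r2 n with
      | some j =>
        have h2 : n ∈ r2 := vm_mem_of_index?_some r2 n j hidx2
        rw [PySem.List.index?_eq_idxOf?] at hidx2
        simp [vmScanA, h0, h1, h2, hidx2]
      | none =>
        have h2 : n ∉ r2 := vm_not_mem_of_index?_none r2 n hidx2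
        cases hidx3 : PySem.List.index? r3 n with
        | some j =>
          have h3 : n ∈ r3 := vm_mem_of_index?_some r3 n j hidx3
          rw [PySem.List.index?_eq_idxOf?] at hidx3
          simp [vmScanA, h0, h1, h2, h3, hidx3]
        | none =>
          have h3 : n ∉ r3 := vm_not_mem_of_index?_none r3 n hidx3
          simp [vmScanA, h0get, h1get, h2get, h3get, h0, h1, h2, h3, hidx0, hidx1, hidx2, hidx3]


-- a tile is absent from every row iff the flattened search fails
theorem vm_absent_iff (gb : List (List String)) (n : String) :
    ((vmCells gb).find? (fun p => p.1 == n) = none) ↔ ∀ row ∈ gb, n ∉ row := by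
  rw [List.find?_eq_none]
  constructor
  · intro h row hrow hmem
    obtain ⟨i, hi, hieq⟩ := List.getElem_of_mem hrow
    obtain ⟨j, hj, hjeq⟩ := List.getElem_of_mem hmem
    exact h (n, ((i : Int), (j : Int)))
      ((mem_vmCells_iff gb n i j).mpr ⟨i, j, row, by simp [List.getElem?_eq_some_iff, hi, hieq],
        by simp [List.getElem?_eq_some_iff, hj, hjeq], rfl, rfl⟩) (by simp)
  · rintro h ⟨t, xx, yy⟩ hmem
    simp only [beq_iff_eq]
    intro heq; subst heq
    rcases (mem_vmCells_iff gb t xx yy).mp hmem with ⟨i, j, row, hrow, ht, _, _⟩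
    exact h row (List.mem_of_getElem? hrow) (List.mem_of_getElem? ht)

-- one in-range cell access, both coordinates nonnegative
theorem vm_cell_eq (gb : List (List String)) (i j : Nat) (row : List String)
    (hrow : gb[i]? = some row) (hj : j < row.length) :
    vmCell gb (i : Int) (j : Int) = some row[j] := by
  simp [vmCell, PySem.List.pyGet?_natCast, hrow, List.getElem?_eq_some_iff, hj]

-- Int-coordinate wrappers used while discharging the direction branches
theorem vm_cell_eq' (gb : List (List String)) (i : Nat) (z₁ z₂ : Int) (j : Nat) (row : List String)
    (hrow : gb[i]? = some row) (hz₁ : z₁ = (i : Int)) (hz₂ : z₂ = (j : Int)) (hj : j < row.length) :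
    vmCell gb z₁ z₂ = some row[j] := by
  subst hz₁; subst hz₂; exact vm_cell_eq gb i j row hrow hj

theorem vm_mem_blanks_iff' (gb : List (List String)) (x y : Int) (i j : Nat) (row : List String)
    (hrow : gb[i]? = some row) (hj : j < row.length) (hx : x = (i : Int)) (hy : y = (j : Int)) :
    ((x, y) ∈ ((vmCells gb).filter (fun p => p.1 == " ")).map Prod.snd) ↔ row[j] = " " := by
  subst hx; subst hy; exact vm_mem_blanks_iff gb i j row hrow hj

-- ===== VERDICT (by name: the statements are the Claim_ definitions above) =====
theorem verifyMove_spec : Claim_unchanged_verifyMove := by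
  intro gb move pos _ hpre
  unfold Spec_verifyMove
  intro hnD
  obtain ⟨hlen, himp⟩ := hpre
  obtain ⟨c0, c1, rest, hml⟩ : ∃ c0 c1 rest, move.toList = c0 :: c1 :: rest := by
    cases hml : move.toList with
    | nil => rw [hml] at hlen; simp at hlen
    | cons a t =>
      cases t with
      | nil => rw [hml] at hlen; simp at hlen
      | cons b r => exact ⟨a, b, r, rfl⟩
  have hg1 : PySem.Str.pyGet? move 1 = some c1 := by simp [pysem, hml]
  have hg0 : PySem.Str.pyGet? move 0 = some c0 := by simp [pysem, hml]
  have hgetD1 : move.toList.getD 1 ' ' = c1 := by rw [hml]; rfl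
  have hgetD0 : move.toList.getD 0 ' ' = c0 := by rw [hml]; rfl
  rw [hgetD1] at himp
  unfold verifyMove verifyMove_alt
  rw [hg1, hg0]
  by_cases hc1 : c1 ∈ ['l', 'r', 'u', 'd']
  · obtain ⟨hdig, hglen, hrows⟩ := himp hc1
    rw [hgetD0] at hdig
    have hcont : PySem.Dict.contains vmMoves c1 = true := by
      simp only [List.mem_cons, List.not_mem_nil, or_false] at hc1
      rcases hc1 with h | h | h | h <;> subst h <;> decide
    obtain ⟨v, hv, hvr⟩ : ∃ v : Int, PySem.Int.ofChars? [c0] = some v ∧ v ∈ PySem.List.pyRange 0 16 1 := by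
      rcases vm_digit_cases c0 hdig with h|h|h|h|h|h|h|h|h|h <;> subst h <;> exact ⟨_, rfl, by decide⟩
    obtain ⟨r0, r1, r2, r3, hgb⟩ : ∃ r0 r1 r2 r3, gb = [r0, r1, r2, r3] := by
      rcases gb with _|⟨r0, _|⟨r1, _|⟨r2, _|⟨r3, _|⟨r4, t⟩⟩⟩⟩⟩ <;> simp at hglen
      exact ⟨r0, r1, r2, r3, rfl⟩
    subst hgb
    simp only [hcont, Bool.true_eq_false, if_false, hv, hvr, not_true_eq_false, if_neg]
    rw [if_neg (not_not_intro hc1)]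
    rw [vm_scan_find]
    cases hf : (vmCells [r0, r1, r2, r3]).find? (fun p => p.1 == String.ofList [c0]) with
    | none =>
      have habs : ∀ row ∈ [r0, r1, r2, r3], String.ofList [c0] ∉ row :=
        (vm_absent_iff [r0, r1, r2, r3] (String.ofList [c0])).mp hf
      simp only [List.mem_cons, List.not_mem_nil, or_false] at hc1
      rcases hc1 with h | h | h | h <;> subst h
      · -- 'l': both fall through to None
        simp only [hf, Option.map_none, Option.getD_none,
          show PySem.Dict.get? vmMoves 'l' = some ((0 : Int), (-1 : Int)) from by decide, reduceIte]
        try dsimp only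
        split_ifs <;> first | rfl | omega
      · -- 'r': inside D_, contradicting hnD
        exact absurd ⟨hlen, by rw [hgetD1]; simp, by rw [hgetD0]; exact hdig,
          by rw [hgetD0]; exact habs⟩ hnD
      · -- 'u': both fall through to None
        simp only [hf, Option.map_none, Option.getD_none,
          show PySem.Dict.get? vmMoves 'u' = some ((-1 : Int), (0 : Int)) from by decide,
          show ('u' = 'l') = False from by simp, show ('u' = 'r') = False from by simp,
          if_false, reduceIte]
        try dsimp only
        split_ifs <;> first | rfl | omega
      · -- 'd': inside D_, contradicting hnD
        exact absurd ⟨hlen, by rw [hgetD1]; simp, by rw [hgetD0]; exact hdig,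
          by rw [hgetD0]; exact habs⟩ hnD
    | some p =>
      obtain ⟨t, xy⟩ := p
      obtain ⟨xx, yy⟩ := xy
      have hp1 : t = String.ofList [c0] := by simpa using List.find?_some hf
      subst hp1
      rcases (mem_vmCells_iff [r0, r1, r2, r3] (String.ofList [c0]) xx yy).mp
        (List.mem_of_find?_eq_some hf) with ⟨i, j, row, hrow, ht, hx, hy⟩
      subst hx; subst hy
      have hi4 : i < 4 := by
        have := (List.getElem?_eq_some_iff.mp hrow).1; simpa using this
      have hrmem : row ∈ [r0, r1, r2, r3] := List.mem_of_getElem? hrow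
      have hrl : row.length = 4 := hrows row hrmem
      have hj4 : j < 4 := by
        have := (List.getElem?_eq_some_iff.mp ht).1; omega
      simp only [hf, Option.map_some, Option.getD_some]
      simp only [List.mem_cons, List.not_mem_nil, or_false] at hc1
      rcases hc1 with h | h | h | h <;> subst h
      · -- 'l'
        simp only [show PySem.Dict.get? vmMoves 'l' = some ((0 : Int), (-1 : Int)) from by decide,
          reduceIte]
        by_cases hj : 1 ≤ j
        · rw [vm_cell_eq' [r0, r1, r2, r3] i ((i : Int)) ((j : Int) - 1) (j - 1) row hrow rfl (by omega) (by omega)]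
          have hm := vm_mem_blanks_iff' [r0, r1, r2, r3] ((i : Int) + 0) ((j : Int) + -1)
            i (j - 1) row hrow (by omega) (by omega) (by omega)
          try dsimp only
          split_ifs <;> first | rfl | omega | simp_all | (split_ifs <;> simp_all)
        · split_ifs <;> first | rfl | omega
      · -- 'r'
        simp only [show PySem.Dict.get? vmMoves 'r' = some ((0 : Int), (1 : Int)) from by decide,
          show ('r' = 'l') = False from by simp, if_false, reduceIte]
        by_cases hj : j + 1 < 4
        · rw [vm_cell_eq' [r0, r1, r2, r3] i ((i : Int)) ((j : Int) + 1) (j + 1) row hrow rfl (by omega) (by omega)]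
          have hm := vm_mem_blanks_iff' [r0, r1, r2, r3] ((i : Int) + 0) ((j : Int) + 1)
            i (j + 1) row hrow (by omega) (by omega) (by omega)
          try dsimp only
          split_ifs <;> first | rfl | omega | simp_all | (split_ifs <;> simp_all)
        · split_ifs <;> first | rfl | omega
      · -- 'u'
        simp only [show PySem.Dict.get? vmMoves 'u' = some ((-1 : Int), (0 : Int)) from by decide,
          show ('u' = 'l') = False from by simp, show ('u' = 'r') = False from by simp,
          if_false, reduceIte]
        by_cases hi : 1 ≤ i
        · obtain ⟨row', hrow', hrl'⟩ : ∃ row', [r0, r1, r2, r3][i - 1]? = some row' ∧ row'.length = 4 := by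
            have hi1 : i - 1 < [r0, r1, r2, r3].length := by simp; omega
            exact ⟨[r0, r1, r2, r3][i - 1]'hi1, List.getElem?_eq_getElem hi1,
              hrows _ (List.getElem_mem _)⟩
          rw [vm_cell_eq' [r0, r1, r2, r3] (i - 1) ((i : Int) - 1) ((j : Int)) j row' hrow' (by omega) (by omega) (by omega)]
          have hm := vm_mem_blanks_iff' [r0, r1, r2, r3] ((i : Int) + -1) ((j : Int) + 0)
            (i - 1) j row' hrow' (by omega) (by omega) (by omega)
          try dsimp only
          split_ifs <;> first | rfl | omega | simp_all | (split_ifs <;> simp_all)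
        · split_ifs <;> first | rfl | omega
      · -- 'd'
        simp only [show PySem.Dict.get? vmMoves 'd' = some ((1 : Int), (0 : Int)) from by decide,
          show ('d' = 'l') = False from by simp, show ('d' = 'r') = False from by simp,
          show ('d' = 'u') = False from by simp, if_false, reduceIte]
        by_cases hi : i + 1 < 4
        · obtain ⟨row', hrow', hrl'⟩ : ∃ row', [r0, r1, r2, r3][i + 1]? = some row' ∧ row'.length = 4 := by
            have hi1 : i + 1 < [r0, r1, r2, r3].length := by simp; omega
            exact ⟨[r0, r1, r2, r3][i + 1]'hi1, List.getElem?_eq_getElem hi1,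
              hrows _ (List.getElem_mem _)⟩
          rw [vm_cell_eq' [r0, r1, r2, r3] (i + 1) ((i : Int) + 1) ((j : Int)) j row' hrow' (by omega) (by omega) (by omega)]
          have hm := vm_mem_blanks_iff' [r0, r1, r2, r3] ((i : Int) + 1) ((j : Int) + 0)
            (i + 1) j row' hrow' (by omega) (by omega) (by omega)
          try dsimp only
          split_ifs <;> first | rfl | omega | simp_all | (split_ifs <;> simp_all)
        · split_ifs <;> first | rfl | omega
  · have hcont : PySem.Dict.contains vmMoves c1 = false := by
      simp only [List.mem_cons, List.not_mem_nil, or_false] at hc1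
      push_neg at hc1
      simp [vmMoves, PySem.Dict.contains_insert, hc1.1, hc1.2.1, hc1.2.2.1, hc1.2.2.2]
    simp [hc1, hcont]

theorem verifyMove_changed : Claim_changed_verifyMove := by
  unfold Claim_changed_verifyMove; decide

theorem verifyMove_tight : Claim_exact_verifyMove := by
  intro gb move pos _ hpre hD
  obtain ⟨hlen, himp⟩ := hpre
  obtain ⟨-, hdir, hdig0, habs0⟩ := hD
  obtain ⟨c0, c1, rest, hml⟩ : ∃ c0 c1 rest, move.toList = c0 :: c1 :: rest := by
    cases hml : move.toList with
    | nil => rw [hml] at hlen; simp at hlen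
    | cons a t =>
      cases t with
      | nil => rw [hml] at hlen; simp at hlen
      | cons b r => exact ⟨a, b, r, rfl⟩
  have hg1 : PySem.Str.pyGet? move 1 = some c1 := by simp [pysem, hml]
  have hg0 : PySem.Str.pyGet? move 0 = some c0 := by simp [pysem, hml]
  have hgetD1 : move.toList.getD 1 ' ' = c1 := by rw [hml]; rfl
  have hgetD0 : move.toList.getD 0 ' ' = c0 := by rw [hml]; rfl
  rw [hgetD1] at hdir himp
  rw [hgetD0] at hdig0 habs0
  have hc1 : c1 ∈ ['l', 'r', 'u', 'd'] := by
    simp only [List.mem_cons, List.not_mem_nil, or_false] at hdir ⊢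
    rcases hdir with h | h <;> simp [h]
  obtain ⟨hdig, hglen, hrows⟩ := himp hc1
  obtain ⟨v, hv, hvr⟩ : ∃ v : Int, PySem.Int.ofChars? [c0] = some v ∧ v ∈ PySem.List.pyRange 0 16 1 := by
    rcases vm_digit_cases c0 hdig0 with h|h|h|h|h|h|h|h|h|h <;> subst h <;> exact ⟨_, rfl, by decide⟩
  obtain ⟨r0, r1, r2, r3, hgb⟩ : ∃ r0 r1 r2 r3, gb = [r0, r1, r2, r3] := by
    rcases gb with _|⟨r0, _|⟨r1, _|⟨r2, _|⟨r3, _|⟨r4, t⟩⟩⟩⟩⟩ <;> simp at hglen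
    exact ⟨r0, r1, r2, r3, rfl⟩
  subst hgb
  have hl0 : r0.length = 4 := hrows r0 (by simp)
  have hl3 : r3.length = 4 := hrows r3 (by simp)
  have hcont : PySem.Dict.contains vmMoves c1 = true := by
    simp only [List.mem_cons, List.not_mem_nil, or_false] at hdir
    rcases hdir with h | h <;> subst h <;> decide
  unfold verifyMove verifyMove_alt
  rw [hg1, hg0]
  simp only [hcont, Bool.true_eq_false, if_false, hv, hvr, not_true_eq_false, if_neg]
  rw [if_neg (not_not_intro hc1)]
  rw [vm_scan_find]
  have hfn : (vmCells [r0, r1, r2, r3]).find? (fun p => p.1 == String.ofList [c0]) = none :=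
    (vm_absent_iff [r0, r1, r2, r3] (String.ofList [c0])).mpr habs0
  simp only [hfn, Option.map_none, Option.getD_none]
  simp only [List.mem_cons, List.not_mem_nil, or_false] at hdir
  rcases hdir with h | h <;> subst h
  · -- 'r': A reads gameBoard[-1][0], B falls through to None
    simp only [show PySem.Dict.get? vmMoves 'r' = some ((0 : Int), (1 : Int)) from by decide,
      show ('r' = 'l') = False from by simp, if_false, reduceIte]
    have h1 : PySem.List.pyGet? [r0, r1, r2, r3] (-1) = some r3 := by
      rw [PySem.List.pyGet?_neg_one]; rfl
    have h2 : PySem.List.pyGet? r3 0 = some (r3[0]'(by omega)) := by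
      rw [PySem.List.pyGet?_zero, List.getElem?_eq_getElem]
    have hA : vmCell [r0, r1, r2, r3] (-1) ((-1 : Int) + 1) = some (r3[0]'(by omega)) := by
      simp [vmCell, h1, h2]
    rw [if_pos (by norm_num), hA]
    rw [if_neg (by norm_num)]
    by_cases hb : (r3[0]'(by omega)) = " " <;> simp [hb]
  · -- 'd': A reads gameBoard[0][-1], B falls through to None
    simp only [show PySem.Dict.get? vmMoves 'd' = some ((1 : Int), (0 : Int)) from by decide,
      show ('d' = 'l') = False from by simp, show ('d' = 'r') = False from by simp,
      show ('d' = 'u') = False from by simp, if_false, reduceIte]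
    obtain ⟨x, hx⟩ : ∃ x, r0.getLast? = some x := by
      cases r0 with
      | nil => simp at hl0
      | cons a t => simp [List.getLast?]
    have h1 : PySem.List.pyGet? [r0, r1, r2, r3] ((-1 : Int) + 1) = some r0 := by norm_num
    have h2 : PySem.List.pyGet? r0 (-1) = some x := by
      rw [PySem.List.pyGet?_neg_one]; exact hx
    have hA : vmCell [r0, r1, r2, r3] ((-1 : Int) + 1) (-1) = some x := by
      simp [vmCell, h1, h2]
    rw [if_pos (by norm_num), hA]
    rw [if_neg (by norm_num)]
    by_cases hb : x = " " <;> simp [hb]
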